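-- pv_equiv track=rewrite | github.com/t0r1n88/Lachesis | mental_state/spilberger_hanin_stai.py | calc_value_lt
-- ===== SOURCE A (Python) =====
-- def calc_value_lt(row):
--     """
--     Функция для подсчета значения
--     :return: число
--     """
--     lst_pr = [22,23,24,25,28,29,31,32,34,35,37,38,40,
--               21,26,27,30,33,36,39]
--     value_forward = 0  # результат
--     value_back = 0
--     for idx, value in enumerate(row,1):
--         if idx in lst_pr:
--             if idx in (22,23,24,25,28,29,31,32,34,35,37,38,40):
--                 value_forward += value
--             elif idx in ( 21,26,27,30,33,36,39):
--                 value_back += value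
--
--     return value_forward - value_back + 35
-- ===== SOURCE B (Python) =====
-- def calc_value_lt(row):
--     forward = (22, 23, 24, 25, 28, 29, 31, 32, 34, 35, 37, 38, 40)
--     back = (21, 26, 27, 30, 33, 36, 39)
--     n = len(row)
--     value_forward = sum(row[i - 1] for i in forward if i - 1 < n)
--     value_back = sum(row[i - 1] for i in back if i - 1 < n)
--     return value_forward - value_back + 35
-- ===== Notes on version B (the rewrite author's own statement) =====
-- stated objective: faster
-- what changed: Instead of scanning the whole row and testing each 1-based position for membership in the index lists, B directly indexes the row at the 13 forward and 7 back positions (skipping those past the end) and sums.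
import Mathlib
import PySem

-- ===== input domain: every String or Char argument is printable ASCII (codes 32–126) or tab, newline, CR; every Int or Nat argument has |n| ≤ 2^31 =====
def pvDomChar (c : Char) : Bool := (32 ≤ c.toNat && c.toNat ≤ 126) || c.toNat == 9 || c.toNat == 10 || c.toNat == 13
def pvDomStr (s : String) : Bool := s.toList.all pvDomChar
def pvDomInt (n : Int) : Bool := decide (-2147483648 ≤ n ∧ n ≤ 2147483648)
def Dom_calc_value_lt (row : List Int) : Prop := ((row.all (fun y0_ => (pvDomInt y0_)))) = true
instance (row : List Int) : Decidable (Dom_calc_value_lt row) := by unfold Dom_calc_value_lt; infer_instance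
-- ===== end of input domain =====

-- B replaces A's whole-row scan with membership tests by direct indexing at the fixed positions (simpler decomposition).


-- ===== PORT A =====
-- lst_pr, the forward tuple and the back tuple, as in A
def pvLstPr : List Nat := [22,23,24,25,28,29,31,32,34,35,37,38,40,21,26,27,30,33,36,39]
def pvLstF : List Nat := [22,23,24,25,28,29,31,32,34,35,37,38,40]
def pvLstB : List Nat := [21,26,27,30,33,36,39]

-- the enumerate(row,1) loop of A, carrying (value_forward, value_back)
def pvGoA : List Int → Nat → Int → Int → Int × Int
  | [], _, vf, vb => (vf, vb)
  | v :: rest, idx, vf, vb =>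
    if idx ∈ pvLstPr then
      if idx ∈ pvLstF then pvGoA rest (idx + 1) (vf + v) vb
      else if idx ∈ pvLstB then pvGoA rest (idx + 1) vf (vb + v)
      else pvGoA rest (idx + 1) vf vb
    else pvGoA rest (idx + 1) vf vb

def calc_value_lt (row : List Int) : Int :=
  let p := pvGoA row 1 0 0
  p.1 - p.2 + 35

-- ===== PORT B =====
-- sum(row[i-1] for i in idxs if i-1 < n); i ≥ 21 in both tuples so i-1 is a plain nonnegative index
def pvSumIdx (row : List Int) (idxs : List Nat) : Int :=
  ((idxs.filter (fun i => i - 1 < row.length)).map (fun i => row.getD (i - 1) 0)).sum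

def calc_value_lt_alt (row : List Int) : Int :=
  pvSumIdx row pvLstF - pvSumIdx row pvLstB + 35

-- ===== PRECONDITION & SPEC =====
def Spec_calc_value_lt (row : List Int) (out : Int) : Prop := out = calc_value_lt_alt row
instance (row : List Int) (out : Int) : Decidable (Spec_calc_value_lt row out) := by unfold Spec_calc_value_lt; infer_instance

-- ===== CLAIM (what is proved, stated in full; the proofs are below) =====
def Claim_equal_calc_value_lt : Prop := ∀ (row : List Int), Dom_calc_value_lt row → Spec_calc_value_lt row (calc_value_lt row)

-- ===== LEMMAS AND PROOFS =====

-- positional sum: values of row whose 1-based position (counting from `start`) lies in L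
def pvS (row : List Int) (L : List Nat) (start : Nat) : Int :=
  ∑ j ∈ Finset.range row.length, if start + j ∈ L then row.getD j 0 else 0

theorem pvS_nil (L : List Nat) (start : Nat) : pvS [] L start = 0 := by
  simp [pvS]

theorem pvS_cons (v : Int) (rest : List Int) (L : List Nat) (start : Nat) :
    pvS (v :: rest) L start = (if start ∈ L then v else 0) + pvS rest L (start + 1) := by
  unfold pvS
  rw [show (v :: rest).length = rest.length + 1 from rfl, Finset.sum_range_succ']
  simp only [List.getD_cons_succ, List.getD_cons_zero, Nat.add_zero]
  rw [add_comm]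
  congr 1
  apply Finset.sum_congr rfl
  intro j _
  rw [show start + (j + 1) = start + 1 + j by omega]

theorem pvGoA_eq (row : List Int) :
    ∀ (idx : Nat) (vf vb : Int),
      pvGoA row idx vf vb = (vf + pvS row pvLstF idx, vb + pvS row pvLstB idx) := by
  induction row with
  | nil => intro idx vf vb; simp [pvGoA, pvS_nil]
  | cons v rest ih =>
    intro idx vf vb
    have hpr : idx ∈ pvLstPr ↔ idx ∈ pvLstF ∨ idx ∈ pvLstB := by
      simp [pvLstPr, pvLstF, pvLstB]; omega
    have hdisj : idx ∈ pvLstF → idx ∉ pvLstB := by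
      simp [pvLstF, pvLstB]; omega
    rw [pvS_cons, pvS_cons]
    by_cases hF : idx ∈ pvLstF
    · have hB : idx ∉ pvLstB := hdisj hF
      simp [pvGoA, hpr, hF, hB, ih, add_assoc]
    · by_cases hB : idx ∈ pvLstB
      · simp [pvGoA, hpr, hF, hB, ih, add_assoc]
      · simp [pvGoA, hpr, hF, hB, ih]

theorem pvSumIdx_eq (row : List Int) (L : List Nat) (hnd : L.Nodup) (h1 : ∀ i ∈ L, 1 ≤ i) :
    pvSumIdx row L = pvS row L 1 := by
  induction L with
  | nil => simp [pvSumIdx, pvS]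
  | cons i rest ih =>
    have hi : 1 ≤ i := h1 i (List.mem_cons_self ..)
    have hnotin : i ∉ rest := (List.nodup_cons.mp hnd).1
    have hrest := ih (List.nodup_cons.mp hnd).2 (fun j hj => h1 j (List.mem_cons_of_mem _ hj))
    have hsplit : pvS row (i :: rest) 1 =
        (∑ j ∈ Finset.range row.length, if 1 + j = i then row.getD j 0 else 0) + pvS row rest 1 := by
      unfold pvS
      rw [← Finset.sum_add_distrib]
      apply Finset.sum_congr rfl
      intro j _
      by_cases hj : 1 + j = i
      · simp [hj, hnotin]
      · simp [List.mem_cons, hj]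
    have hsingle : (∑ j ∈ Finset.range row.length, if 1 + j = i then row.getD j 0 else 0) =
        if i - 1 < row.length then row.getD (i - 1) 0 else 0 := by
      rw [show (∑ j ∈ Finset.range row.length, if 1 + j = i then row.getD j 0 else 0) =
          ∑ j ∈ Finset.range row.length, if j = i - 1 then row.getD j 0 else 0 from
        Finset.sum_congr rfl (fun j _ => by
          congr 1
          simp only [eq_iff_iff]
          omega)]
      rw [Finset.sum_ite_eq' (Finset.range row.length) (i - 1) (fun j => row.getD j 0)]
      simp
    have hstep : pvSumIdx row (i :: rest)
        = (if i - 1 < row.length then row.getD (i - 1) 0 else 0) + pvSumIdx row rest := by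
      by_cases hlt : i - 1 < row.length
      · simp [pvSumIdx, hlt]
      · simp [pvSumIdx, hlt]
    rw [hstep, hsplit, hsingle, hrest]

-- ===== VERDICT (by name: the statement is the Claim_ definition above) =====
theorem calc_value_lt_spec : Claim_equal_calc_value_lt := by
  intro row _
  unfold Spec_calc_value_lt calc_value_lt calc_value_lt_alt
  rw [pvGoA_eq, pvSumIdx_eq row pvLstF (by decide) (by decide),
    pvSumIdx_eq row pvLstB (by decide) (by decide)]
  simp
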